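-- pv_equiv track=rewrite | github.com/OrLeaKatz/TreeDetection | image_engineering/Model/crop and stitch/calculacte_xy.py | calcul_xy_array
-- ===== SOURCE A (Python) =====
-- def calcul_xy_array(img_x, img_y, tile_x, tile_y):
--     array = []
--
--     modu_x = img_x % tile_x
--     modu_y = img_y % tile_y
--     div_x = img_x // tile_x
--     div_y = img_y // tile_y
--     current_x = 0
--     current_y = 0
--
--     for i in range(div_y):
--         for j in range(div_x):
--             array.append((current_x, current_y))
--             current_x += tile_x
--         if modu_x:
--             array.append((img_x - tile_x, current_y))
--         current_y += tile_y
--         current_x = 0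
--
--     if modu_y:
--         current_y = img_y - tile_y
--         for j in range(div_x):
--             array.append((current_x, current_y))
--             current_x += tile_x
--         if modu_x:
--             array.append((img_x - tile_x, current_y))
--
--     return array
-- ===== SOURCE B (Python) =====
-- def calcul_xy_array(img_x, img_y, tile_x, tile_y):
--     div_x, modu_x = divmod(img_x, tile_x)
--     div_y, modu_y = divmod(img_y, tile_y)
--     ys = [i * tile_y for i in range(div_y)]
--     if modu_y:
--         ys.append(img_y - tile_y)
--     if not ys:
--         return []
--     xs = [j * tile_x for j in range(div_x)]
--     if modu_x:
--         xs.append(img_x - tile_x)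
--     return [(x, y) for y in ys for x in xs]
-- ===== Notes on version B (the rewrite author's own statement) =====
-- stated objective: simpler
-- what changed: Replaces A's four special-cased emission blocks with running x/y counters by precomputing the two coordinate axes (xs, ys) and returning their cartesian product in one comprehension.
import Mathlib
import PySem

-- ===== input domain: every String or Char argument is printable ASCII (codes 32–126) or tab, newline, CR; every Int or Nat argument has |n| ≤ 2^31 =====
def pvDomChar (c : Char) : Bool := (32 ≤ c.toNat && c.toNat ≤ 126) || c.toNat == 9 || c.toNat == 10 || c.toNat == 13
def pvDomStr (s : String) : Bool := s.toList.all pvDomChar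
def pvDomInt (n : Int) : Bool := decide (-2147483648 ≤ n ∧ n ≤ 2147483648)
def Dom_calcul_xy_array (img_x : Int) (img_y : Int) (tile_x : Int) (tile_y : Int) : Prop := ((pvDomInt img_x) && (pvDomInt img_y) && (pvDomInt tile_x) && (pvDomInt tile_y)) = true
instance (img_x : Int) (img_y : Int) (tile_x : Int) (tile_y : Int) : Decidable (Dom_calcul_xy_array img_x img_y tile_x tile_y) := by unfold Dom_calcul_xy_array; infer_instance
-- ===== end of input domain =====

-- B precomputes the two coordinate axes and emits their cartesian product, replacing A's
-- nested counter loops with special-cased remainder blocks (objective: simpler).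

-- ===== PORT A =====
def calcul_xy_array (img_x : Int) (img_y : Int) (tile_x : Int) (tile_y : Int) : List (Int × Int) :=
  let modu_x := PySem.Int.mod img_x tile_x
  let modu_y := PySem.Int.mod img_y tile_y
  let div_x := PySem.Int.floordiv img_x tile_x
  let div_y := PySem.Int.floordiv img_y tile_y
  -- for i in range(div_y): inner loop over j, optional remainder tile, advance current_y, reset current_x
  let st := (PySem.List.pyRange 0 div_y 1).foldl
    (fun (s : List (Int × Int) × Int × Int) _ =>
      let inner := (PySem.List.pyRange 0 div_x 1).foldl
        (fun (t : List (Int × Int) × Int) _ => (t.1 ++ [(t.2, s.2.2)], t.2 + tile_x)) (s.1, s.2.1)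
      let arr := if modu_x ≠ 0 then inner.1 ++ [(img_x - tile_x, s.2.2)] else inner.1
      (arr, 0, s.2.2 + tile_y)) ([], 0, 0)
  if modu_y ≠ 0 then
    let cy := img_y - tile_y
    let inner := (PySem.List.pyRange 0 div_x 1).foldl
      (fun (t : List (Int × Int) × Int) _ => (t.1 ++ [(t.2, cy)], t.2 + tile_x)) (st.1, st.2.1)
    if modu_x ≠ 0 then inner.1 ++ [(img_x - tile_x, cy)] else inner.1
  else st.1

-- ===== PORT B =====
def calcul_xy_array_alt (img_x : Int) (img_y : Int) (tile_x : Int) (tile_y : Int) : List (Int × Int) :=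
  let div_x := PySem.Int.floordiv img_x tile_x
  let modu_x := PySem.Int.mod img_x tile_x
  let div_y := PySem.Int.floordiv img_y tile_y
  let modu_y := PySem.Int.mod img_y tile_y
  let ys := (PySem.List.pyRange 0 div_y 1).map (fun i => i * tile_y)
    ++ (if modu_y ≠ 0 then [img_y - tile_y] else [])
  if ys = [] then []
  else
    let xs := (PySem.List.pyRange 0 div_x 1).map (fun j => j * tile_x)
      ++ (if modu_x ≠ 0 then [img_x - tile_x] else [])
    ys.flatMap (fun y => xs.map (fun x => (x, y)))

-- ===== PRECONDITION & SPEC =====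
-- A raises ZeroDivisionError when tile_x = 0 or tile_y = 0; Pre_ excludes exactly those inputs.
def Pre_calcul_xy_array (img_x : Int) (img_y : Int) (tile_x : Int) (tile_y : Int) : Prop :=
  tile_x ≠ 0 ∧ tile_y ≠ 0
instance (img_x : Int) (img_y : Int) (tile_x : Int) (tile_y : Int) : Decidable (Pre_calcul_xy_array img_x img_y tile_x tile_y) := by unfold Pre_calcul_xy_array; infer_instance
def pvWitness_calcul_xy_array : Int × Int × Int × Int := (10, 7, 3, 3)

def Spec_calcul_xy_array (img_x : Int) (img_y : Int) (tile_x : Int) (tile_y : Int) (out : List (Int × Int)) : Prop := out = calcul_xy_array_alt img_x img_y tile_x tile_y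
instance (img_x : Int) (img_y : Int) (tile_x : Int) (tile_y : Int) (out : List (Int × Int)) : Decidable (Spec_calcul_xy_array img_x img_y tile_x tile_y out) := by unfold Spec_calcul_xy_array; infer_instance

-- ===== CLAIM (what is proved, stated in full; the proofs are below) =====
def Claim_equal_calcul_xy_array : Prop := ∀ (img_x : Int) (img_y : Int) (tile_x : Int) (tile_y : Int), Dom_calcul_xy_array img_x img_y tile_x tile_y → Pre_calcul_xy_array img_x img_y tile_x tile_y → Spec_calcul_xy_array img_x img_y tile_x tile_y (calcul_xy_array img_x img_y tile_x tile_y)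

-- ===== LEMMAS AND PROOFS =====

-- the inner row loop appends one row of x coordinates and advances current_x
theorem pv_inner (tile_x y : Int) (m : Nat) : ∀ (arr : List (Int × Int)) (cx : Int),
    (List.range m).foldl (fun (t : List (Int × Int) × Int) _ => (t.1 ++ [(t.2, y)], t.2 + tile_x)) (arr, cx)
      = (arr ++ (List.range m).map (fun k => (cx + (k : Int) * tile_x, y)), cx + (m : Int) * tile_x) := by
  induction m with
  | zero => intro arr cx; simp
  | succ n ih =>
    intro arr cx
    rw [List.range_succ, List.foldl_append, ih]
    simp
    ring

-- one full outer-loop iteration (inner loop + optional remainder tile) appends one row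
theorem pv_row (tile_x img_x : Int) (mx : Int) (m : Nat) (cy : Int) (arr : List (Int × Int)) :
    (if mx ≠ 0 then
        ((List.range m).foldl (fun (t : List (Int × Int) × Int) _ => (t.1 ++ [(t.2, cy)], t.2 + tile_x)) (arr, (0:Int))).1
          ++ [(img_x - tile_x, cy)]
      else ((List.range m).foldl (fun (t : List (Int × Int) × Int) _ => (t.1 ++ [(t.2, cy)], t.2 + tile_x)) (arr, (0:Int))).1)
    = arr ++ ((List.range m).map (fun k => ((k:Int) * tile_x, cy))
        ++ (if mx ≠ 0 then [(img_x - tile_x, cy)] else [])) := by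
  rw [pv_inner]
  split <;> simp

-- the outer loop appends one row per y coordinate and keeps current_x reset to 0
theorem pv_outerloop (tile_x tile_y img_x : Int) (mx : Int) (m n : Nat) :
    ∀ (arr : List (Int × Int)) (cy0 : Int),
    (List.range n).foldl
      (fun (s : List (Int × Int) × Int × Int) _ =>
        let inner := (List.range m).foldl
          (fun (t : List (Int × Int) × Int) _ => (t.1 ++ [(t.2, s.2.2)], t.2 + tile_x)) (s.1, s.2.1)
        let arr2 := if mx ≠ 0 then inner.1 ++ [(img_x - tile_x, s.2.2)] else inner.1
        (arr2, 0, s.2.2 + tile_y)) (arr, 0, cy0)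
    = (arr ++ (List.range n).flatMap (fun i =>
          (List.range m).map (fun k => ((k:Int) * tile_x, cy0 + (i:Int) * tile_y))
            ++ (if mx ≠ 0 then [(img_x - tile_x, cy0 + (i:Int) * tile_y)] else [])),
        0, cy0 + (n:Int) * tile_y) := by
  induction n with
  | zero => intro arr cy0; simp
  | succ n ih =>
    intro arr cy0
    rw [List.range_succ, List.foldl_append, ih]
    simp only [List.foldl_cons, List.foldl_nil]
    rw [pv_row tile_x img_x mx m (cy0 + (n:Int) * tile_y) _]
    simp [List.flatMap_append, List.append_assoc]
    ring

-- the empty-ys early return of B is the same as the flatMap over the empty list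
theorem pv_guard {α β : Type} (l : List α) (f : α → List β) :
    (if l = [] then [] else l.flatMap f) = l.flatMap f := by
  cases l <;> simp

theorem calcul_xy_array_spec : Claim_equal_calcul_xy_array := by
  intro img_x img_y tile_x tile_y _ _
  unfold Spec_calcul_xy_array calcul_xy_array calcul_xy_array_alt
  rw [pv_guard]
  simp only [PySem.List.pyRange_one, Int.sub_zero, List.foldl_map, zero_add]
  rw [pv_outerloop tile_x tile_y img_x (PySem.Int.mod img_x tile_x)
        (PySem.Int.floordiv img_x tile_x).toNat (PySem.Int.floordiv img_y tile_y).toNat [] 0]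
  simp only [List.nil_append, zero_add]
  split
  · rw [pv_row tile_x img_x (PySem.Int.mod img_x tile_x) _ (img_y - tile_y)]
    by_cases hmx : PySem.Int.mod img_x tile_x = 0 <;>
      simp [hmx, List.flatMap_append, List.map_map, Function.comp_def, List.map_append, List.flatMap_assoc, List.flatMap_singleton, List.flatMap_map, List.map_eq_flatMap]
  · by_cases hmx : PySem.Int.mod img_x tile_x = 0 <;>
      simp [hmx, List.flatMap_append, List.map_map, Function.comp_def, List.map_append, List.flatMap_assoc, List.flatMap_singleton, List.flatMap_map, List.map_eq_flatMap]
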